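-- pv_equiv track=rewrite | github.com/pypi-data/pypi-mirror-327 | packages/xi_covutils/xi_covutils-0.7.0.6.tar.gz/xi_covutils-0.7.0.6/xi_covutils/msa/_msa.py | get_terminal_gaps
-- ===== SOURCE A (Python) =====
-- from functools import reduce
--
-- def get_terminal_gaps(sequence:str) -> list[bool]:
--   """
--   Extract terminal gaps
--
--   Gets a True/False list for a sequence indicating which positions are
--   terminal gaps.
--
--   Args:
--     sequence (str): A gapped sequence.
--
--   Returns:
--     list[bool]: A list where True corresponds to terminal gaps.
--   """
--   _, terminal_gaps_fw = reduce(
--     lambda a, b: (a[0] and b == '-', a[1] + [a[0] and b == '-']),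
--     sequence,
--     (True, [])
--   )
--   _, terminal_gaps_rv = reduce(
--     lambda a, b: (a[0] and b == '-', a[1] + [a[0] and b == '-']),
--     reversed(sequence),
--     (True, [])
--   )
--   return [a or b for a, b in zip(terminal_gaps_fw, reversed(terminal_gaps_rv))]
-- ===== SOURCE B (Python) =====
-- def get_terminal_gaps(sequence: str) -> list[bool]:
--     n = len(sequence)
--     lead = 0
--     for c in sequence:
--         if c != '-':
--             break
--         lead += 1
--     if lead == n:
--         return [True] * n
--     trail = 0
--     for c in reversed(sequence):
--         if c != '-':
--             break
--         trail += 1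
--     last = n - 1 - trail
--     return [i < lead or i > last for i in range(n)]
-- ===== Notes on version B (the rewrite author's own statement) =====
-- stated objective: simpler
-- what changed: Replaced the two list-appending reduce passes plus zip/reversed combination by counting leading and trailing gaps with two early-exit scans and emitting position i as i < lead or i > last in one indexed pass.
import Mathlib
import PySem

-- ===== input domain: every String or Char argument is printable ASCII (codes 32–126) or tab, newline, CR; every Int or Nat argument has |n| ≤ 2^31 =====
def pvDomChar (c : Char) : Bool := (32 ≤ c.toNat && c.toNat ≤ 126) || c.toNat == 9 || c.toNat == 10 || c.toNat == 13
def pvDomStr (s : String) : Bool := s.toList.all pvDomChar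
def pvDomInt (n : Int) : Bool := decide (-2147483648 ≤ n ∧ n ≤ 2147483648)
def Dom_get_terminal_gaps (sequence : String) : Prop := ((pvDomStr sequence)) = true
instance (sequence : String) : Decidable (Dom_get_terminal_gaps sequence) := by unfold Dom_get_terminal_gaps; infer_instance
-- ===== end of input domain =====

-- B replaces A's two list-appending reduce passes with counting leading/trailing gaps and one indexed pass (simpler, and avoids quadratic list concatenation).

-- ===== PORT A =====
-- the reduce's lambda
def pvStepA (a : Bool × List Bool) (b : Char) : Bool × List Bool :=
  (a.1 && (b == '-'), a.2 ++ [a.1 && (b == '-')])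

def get_terminal_gaps (sequence : String) : List Bool :=
  let terminal_gaps_fw := (sequence.toList.foldl pvStepA (true, [])).2
  let terminal_gaps_rv := (sequence.toList.reverse.foldl pvStepA (true, [])).2
  List.zipWith (fun a b => a || b) terminal_gaps_fw terminal_gaps_rv.reverse

-- ===== PORT B =====
-- the early-exit 'count leading gaps' loop of Source B
def pvCountLead : List Char → Nat
  | [] => 0
  | c :: cs => if c = '-' then pvCountLead cs + 1 else 0

def get_terminal_gaps_alt (sequence : String) : List Bool :=
  let l := sequence.toList
  let n := l.length
  let lead := pvCountLead l
  if lead = n then List.replicate n true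
  else
    let trail := pvCountLead l.reverse
    let last := n - 1 - trail
    (List.range n).map (fun i => decide (i < lead) || decide (last < i))

-- ===== PRECONDITION & SPEC =====
def Spec_get_terminal_gaps (sequence : String) (out : List Bool) : Prop := out = get_terminal_gaps_alt sequence
instance (sequence : String) (out : List Bool) : Decidable (Spec_get_terminal_gaps sequence out) := by unfold Spec_get_terminal_gaps; infer_instance

-- ===== CLAIM (what is proved, stated in full; the proofs are below) =====
def Claim_equal_get_terminal_gaps : Prop := ∀ (sequence : String), Dom_get_terminal_gaps sequence → Spec_get_terminal_gaps sequence (get_terminal_gaps sequence)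

-- ===== LEMMAS AND PROOFS =====

-- the per-position values A's reduce appends, as a standalone recursion
def pvG (b : Bool) : List Char → List Bool
  | [] => []
  | c :: cs => (b && (c == '-')) :: pvG (b && (c == '-')) cs

theorem pvFoldA (l : List Char) (b : Bool) (acc : List Bool) :
    l.foldl pvStepA (b, acc) = (b && l.all (· == '-'), acc ++ pvG b l) := by
  induction l generalizing b acc with
  | nil => simp [pvG]
  | cons c cs ih => simp [pvStepA, pvG, ih, Bool.and_assoc]

theorem pvG_length (b : Bool) (l : List Char) : (pvG b l).length = l.length := by
  induction l generalizing b with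
  | nil => rfl
  | cons c cs ih => simp [pvG, ih]

theorem pvG_false (l : List Char) : pvG false l = List.replicate l.length false := by
  induction l with
  | nil => rfl
  | cons c cs ih => simp [pvG, ih, List.replicate_succ]

theorem pvCountLead_le (l : List Char) : pvCountLead l ≤ l.length := by
  induction l with
  | nil => simp [pvCountLead]
  | cons c cs ih => by_cases h : c = '-' <;> simp [pvCountLead, h] <;> omega

theorem pvCountLead_eq_length (l : List Char) :
    pvCountLead l = l.length ↔ ∀ c ∈ l, c = '-' := by
  induction l with
  | nil => simp [pvCountLead]
  | cons c cs ih =>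
    by_cases h : c = '-'
    · simp [pvCountLead, h, ih]
    · simp [pvCountLead, h]

theorem pvG_getElem (l : List Char) (i : Nat) (hi : i < l.length) :
    (pvG true l)[i]'(by rw [pvG_length]; exact hi) = decide (i < pvCountLead l) := by
  induction l generalizing i with
  | nil => simp at hi
  | cons c cs ih =>
    by_cases h : c = '-'
    · cases i with
      | zero => simp [pvG, h, pvCountLead]
      | succ j =>
        have hj : j < cs.length := by simpa using hi
        have := ih j hj
        simp [pvG, h, pvCountLead, this]
    · cases i with
      | zero => simp [pvG, h, pvCountLead]
      | succ j =>
        have hj : j < cs.length := by simpa using hi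
        have hc : (c == '-') = false := by simp [h]
        simp [pvG, pvCountLead, h, hc, pvG_false]

-- ===== VERDICT (by name: the statement is the Claim_ definition above) =====
theorem get_terminal_gaps_spec : Claim_equal_get_terminal_gaps := by
  intro sequence _
  unfold Spec_get_terminal_gaps get_terminal_gaps get_terminal_gaps_alt
  simp only [pvFoldA, List.nil_append]
  generalize sequence.toList = l
  by_cases hall : pvCountLead l = l.length
  · -- all-gaps (or empty) case: A's zipWith is all true
    rw [if_pos hall]
    apply List.ext_getElem
    · simp [pvG_length]
    · intro i h1 h2
      have hi : i < l.length := by simpa using h2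
      have hfw := pvG_getElem l i hi
      simp only [List.getElem_zipWith, List.getElem_replicate]
      rw [hfw]
      simp [hall, hi]
  · rw [if_neg hall]
    have htr : pvCountLead l.reverse ≠ l.reverse.length := by
      intro h
      rw [pvCountLead_eq_length] at h
      exact hall ((pvCountLead_eq_length l).2 (fun c hc => h c (by simpa using hc)))
    have htr' : pvCountLead l.reverse < l.length := by
      have := pvCountLead_le l.reverse
      simp only [List.length_reverse] at this htr
      omega
    apply List.ext_getElem
    · simp [pvG_length]
    · intro i h1 h2
      have hi : i < l.length := by simpa [pvG_length] using h1
      have hrevlen : (pvG true l.reverse).length = l.length := by simp [pvG_length]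
      have hfw := pvG_getElem l i hi
      have hrv := pvG_getElem l.reverse (l.length - 1 - i) (by simp; omega)
      simp only [List.getElem_zipWith, List.getElem_reverse, List.getElem_map, List.getElem_range]
      rw [hfw]
      simp only [hrevlen]
      rw [hrv]
      have hle := pvCountLead_le l
      congr 1
      simp only [decide_eq_decide]
      omega
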